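-- pv_equiv track=rewrite | github.com/lamawmouk/SGMRIQA | scripts/cleaning/clean_brain_qa.py | determine_hemisphere
-- ===== SOURCE A (Python) =====
-- MIDPOINT_X = 130
--
-- def determine_hemisphere(x_values):
--     """Determine hemisphere from bbox x values. Returns 'right', 'left', or 'bilateral'."""
--     if not x_values:
--         return None
--     has_right = any(x < MIDPOINT_X for x in x_values)
--     has_left = any(x >= MIDPOINT_X for x in x_values)
--     if has_right and has_left:
--         return 'bilateral'
--     elif has_right:
--         return 'right'
--     else:
--         return 'left'
-- ===== SOURCE B (Python) =====
-- MIDPOINT_X = 130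
--
-- def determine_hemisphere(x_values):
--     """Determine hemisphere from bbox x values. Returns 'right', 'left', or 'bilateral'."""
--     if not x_values:
--         return None
--     first, rest = x_values[0], x_values[1:]
--     if first < MIDPOINT_X:
--         # candidate 'right'; any element on the left side makes it bilateral
--         for x in rest:
--             if x >= MIDPOINT_X:
--                 return 'bilateral'
--         return 'right'
--     else:
--         # candidate 'left'; any element on the right side makes it bilateral
--         for x in rest:
--             if x < MIDPOINT_X:
--                 return 'bilateral'
--         return 'left'
-- ===== Notes on version B (the rewrite author's own statement) =====
-- stated objective: alternative
-- what changed: B lets the first element fix a candidate hemisphere and then does one early-exit scan of the rest for an element on the opposite side (returning 'bilateral' immediately), instead of A's two full existential any() scans combined by boolean flags.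
import Mathlib
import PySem

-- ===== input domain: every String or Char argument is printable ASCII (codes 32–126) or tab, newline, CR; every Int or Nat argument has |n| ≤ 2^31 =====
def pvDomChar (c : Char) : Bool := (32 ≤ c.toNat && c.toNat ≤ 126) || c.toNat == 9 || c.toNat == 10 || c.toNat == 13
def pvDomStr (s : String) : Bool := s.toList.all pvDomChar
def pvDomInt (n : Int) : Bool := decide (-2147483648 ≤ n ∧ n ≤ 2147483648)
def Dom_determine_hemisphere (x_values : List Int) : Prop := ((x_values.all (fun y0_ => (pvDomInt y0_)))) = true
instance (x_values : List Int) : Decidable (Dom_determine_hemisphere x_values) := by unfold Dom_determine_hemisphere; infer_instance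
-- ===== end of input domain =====

-- B: the first element fixes a candidate hemisphere, then one early-exit scan of the rest
-- looks for an element on the opposite side (alternative decomposition, same O(n) cost).

-- ===== PORT A =====
def determine_hemisphere (x_values : List Int) : Option String :=
  if x_values.isEmpty then none
  else
    let has_right := x_values.any (fun x => decide (x < 130))
    let has_left := x_values.any (fun x => decide (x ≥ 130))
    if has_right && has_left then some "bilateral"
    else if has_right then some "right"
    else some "left"

-- ===== PORT B =====
-- candidate 'right': scan for an element on the left side (x ≥ 130)
def dhScanRight : List Int → Option String
  | [] => some "right"
  | x :: t => if x ≥ 130 then some "bilateral" else dhScanRight t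

-- candidate 'left': scan for an element on the right side (x < 130)
def dhScanLeft : List Int → Option String
  | [] => some "left"
  | x :: t => if x < 130 then some "bilateral" else dhScanLeft t

def determine_hemisphere_alt (x_values : List Int) : Option String :=
  match x_values with
  | [] => none
  | first :: rest =>
    if first < 130 then dhScanRight rest else dhScanLeft rest

-- ===== PRECONDITION & SPEC =====
def Spec_determine_hemisphere (x_values : List Int) (out : Option String) : Prop := out = determine_hemisphere_alt x_values
instance (x_values : List Int) (out : Option String) : Decidable (Spec_determine_hemisphere x_values out) := by unfold Spec_determine_hemisphere; infer_instance

-- ===== CLAIM (what is proved, stated in full; the proofs are below) =====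
def Claim_equal_determine_hemisphere : Prop := ∀ (x_values : List Int), Dom_determine_hemisphere x_values → Spec_determine_hemisphere x_values (determine_hemisphere x_values)

-- ===== LEMMAS AND PROOFS =====

theorem dhScanRight_eq (t : List Int) :
    dhScanRight t = if t.any (fun x => decide (x ≥ 130)) then some "bilateral" else some "right" := by
  induction t with
  | nil => simp [dhScanRight]
  | cons b s ih =>
    by_cases hb : b ≥ 130 <;> simp [dhScanRight, hb, ih]

theorem dhScanLeft_eq (t : List Int) :
    dhScanLeft t = if t.any (fun x => decide (x < 130)) then some "bilateral" else some "left" := by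
  induction t with
  | nil => simp [dhScanLeft]
  | cons b s ih =>
    by_cases hb : b < 130 <;> simp [dhScanLeft, hb, ih]

-- ===== VERDICT (by name: the statement is the Claim_ definition above) =====
theorem determine_hemisphere_spec : Claim_equal_determine_hemisphere := by
  intro xs _
  unfold Spec_determine_hemisphere determine_hemisphere determine_hemisphere_alt
  cases xs with
  | nil => simp
  | cons x t =>
    simp only [List.isEmpty_cons, Bool.false_eq_true, if_false, List.any_cons]
    by_cases hx : x < 130
    · have hx' : ¬ x ≥ 130 := by omega
      rw [if_pos hx, dhScanRight_eq]
      by_cases ht : t.any (fun y => decide (y ≥ 130)) = true <;>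
        simp [hx, hx', ht]
    · have hx' : x ≥ 130 := by omega
      rw [if_neg hx, dhScanLeft_eq]
      by_cases ht : t.any (fun y => decide (y < 130)) = true <;>
        simp [hx, hx', ht]
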